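-- pv_equiv track=rewrite | github.com/Elvaxia/APA | Hema_mouse/3seq/quantifyPA/quantifyPA/pabulks.py | MaxKeys
-- ===== SOURCE A (Python) =====
-- def MaxKeys(k, countdic, samdic):
--     """Return the max reads count in given regions and the sam reads
--     """
--     c_key = 0
--     c_values = 0
--     valuesum = 0
--     readsinfo = []
--     for i in k:
--         if c_key == 0:
--             c_key = i
--             c_values = countdic[c_key]
--             valuesum += countdic[i]
--             readsinfo.extend(samdic[i])
--         else:
--             if c_values > countdic[i]:
--                 valuesum += countdic[i]
--                 readsinfo.extend(samdic[i])
--                 continue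
--             else:
--                 c_key = i
--                 c_values = countdic[i]
--                 valuesum += countdic[i]
--                 readsinfo.extend(samdic[i])
--     return (c_key, valuesum), {c_key: readsinfo}
-- ===== SOURCE B (Python) =====
-- def MaxKeys(k, countdic, samdic):
--     """Return the max reads count in given regions and the sam reads"""
--     counts = [countdic[i] for i in k]
--     m = max(counts)
--     c_key = next(i for i in reversed(k) if countdic[i] == m)
--     return (c_key, sum(counts)), {c_key: [r for i in k for r in samdic[i]]}
-- ===== Notes on version B (the rewrite author's own statement) =====
-- stated objective: alternative
-- what changed: Instead of A's single fused loop with sentinel key state (c_key = 0) and a running argmax, B first computes the list of counts and its plain max, then finds the winning key by a backward search (first key in reversed(k) whose count equals the max, reproducing A's last-wins tie rule), with the sum and the reads concatenation as separate passes.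
-- outside the precondition, e.g. on MaxKeys([], {}, {}): A returns ((0, 0), {0: []}), B raises ValueError
import Mathlib
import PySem

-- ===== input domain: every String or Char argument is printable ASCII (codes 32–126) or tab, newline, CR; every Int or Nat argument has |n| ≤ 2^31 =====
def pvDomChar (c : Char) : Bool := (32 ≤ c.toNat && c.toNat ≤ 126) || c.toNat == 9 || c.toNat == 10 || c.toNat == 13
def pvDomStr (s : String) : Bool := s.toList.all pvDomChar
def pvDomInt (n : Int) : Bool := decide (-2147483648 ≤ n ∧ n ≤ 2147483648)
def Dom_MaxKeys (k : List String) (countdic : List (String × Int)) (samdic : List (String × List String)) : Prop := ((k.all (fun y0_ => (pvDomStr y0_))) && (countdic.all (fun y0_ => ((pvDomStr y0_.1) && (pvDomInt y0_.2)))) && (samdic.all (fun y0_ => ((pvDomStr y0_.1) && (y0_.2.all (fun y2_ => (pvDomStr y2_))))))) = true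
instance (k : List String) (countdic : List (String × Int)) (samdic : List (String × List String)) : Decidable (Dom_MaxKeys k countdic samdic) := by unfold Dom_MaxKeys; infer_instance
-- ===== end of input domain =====

-- B computes the max count first and then finds the winning key by a backward search
-- (first key of reversed k whose count equals the max), with the sum and the reads
-- concatenation as separate passes — instead of A's single fused running-argmax loop
-- with its integer-sentinel key state; same cost, a different decomposition.


-- ===== PORT A =====
-- dict lookup d[i] (first match); under Pre_ the key is always present, so the default is never used
def pvDGet {ν : Type} (d : List (String × ν)) (x : String) (dflt : ν) : ν :=
  (PySem.Dict.mk d).getD x dflt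

-- loop state: (c_key — none is Python's initial int 0, which no string equals —, c_values, valuesum, readsinfo)
def MaxKeysStep (countdic : List (String × Int)) (samdic : List (String × List String))
    (st : Option String × Int × Int × List String) (i : String) :
    Option String × Int × Int × List String :=
  match st with
  | (none, _, vs, ri) =>
      (some i, pvDGet countdic i 0, vs + pvDGet countdic i 0, ri ++ pvDGet samdic i [])
  | (some ck, cv, vs, ri) =>
      if cv > pvDGet countdic i 0 then
        (some ck, cv, vs + pvDGet countdic i 0, ri ++ pvDGet samdic i [])
      else
        (some i, pvDGet countdic i 0, vs + pvDGet countdic i 0, ri ++ pvDGet samdic i [])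

def MaxKeys (k : List String) (countdic : List (String × Int)) (samdic : List (String × List String)) : (String × Int) × (List (String × List String)) :=
  let s := k.foldl (MaxKeysStep countdic samdic) (none, 0, 0, [])
  ((s.1.getD "", s.2.2.1), [(s.1.getD "", s.2.2.2)])

-- ===== PORT B =====
def MaxKeys_alt (k : List String) (countdic : List (String × Int)) (samdic : List (String × List String)) : (String × Int) × (List (String × List String)) :=
  let counts := k.map (fun i => pvDGet countdic i 0)
  match PySem.List.max? counts (fun y => y) with
  | none => (("", 0), [("", [])])   -- unreachable under Pre_: Source B's max(counts) raises ValueError on k = []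
  | some m =>
    -- next(i for i in reversed(k) if countdic[i] == m); the default "" is never used:
    -- the max is attained by some key, so the backward search always succeeds
    let c_key := (k.reverse.find? (fun i => pvDGet countdic i 0 == m)).getD ""
    ((c_key, counts.sum), [(c_key, k.flatMap (fun i => pvDGet samdic i []))])

-- ===== PRECONDITION & SPEC =====
-- Pre_ excludes k = [] (A returns the int sentinel 0 as the key — not a String value) and
-- keys of k missing from countdic or samdic (A raises KeyError there).
def Pre_MaxKeys (k : List String) (countdic : List (String × Int)) (samdic : List (String × List String)) : Prop :=
  k ≠ [] ∧ ∀ i ∈ k, i ∈ countdic.map Prod.fst ∧ i ∈ samdic.map Prod.fst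
instance (k : List String) (countdic : List (String × Int)) (samdic : List (String × List String)) : Decidable (Pre_MaxKeys k countdic samdic) := by unfold Pre_MaxKeys; infer_instance

def pvWitness_MaxKeys : List String × (List (String × Int)) × (List (String × List String)) :=
  (["a", "b"], [("a", 3), ("b", 5)], [("a", ["r1"]), ("b", ["r2", "r3"])])

def Spec_MaxKeys (k : List String) (countdic : List (String × Int)) (samdic : List (String × List String)) (out : (String × Int) × (List (String × List String))) : Prop := out = MaxKeys_alt k countdic samdic
instance (k : List String) (countdic : List (String × Int)) (samdic : List (String × List String)) (out : (String × Int) × (List (String × List String))) : Decidable (Spec_MaxKeys k countdic samdic out) := by unfold Spec_MaxKeys; infer_instance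

-- ===== CLAIM (what is proved, stated in full; the proofs are below) =====
def Claim_equal_MaxKeys : Prop := ∀ (k : List String) (countdic : List (String × Int)) (samdic : List (String × List String)), Dom_MaxKeys k countdic samdic → Pre_MaxKeys k countdic samdic → Spec_MaxKeys k countdic samdic (MaxKeys k countdic samdic)

-- ===== LEMMAS AND PROOFS =====

-- A's loop from a string-keyed state equals a forward argmax fold plus the two separate sums.
theorem maxKeys_loop_eq (countdic : List (String × Int)) (samdic : List (String × List String))
    (rest : List String) :
    ∀ (ck : String) (cv vs : Int) (ri : List String),
      rest.foldl (MaxKeysStep countdic samdic) (some ck, cv, vs, ri)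
        = (some (rest.foldl (fun (p : String × Int) i =>
              if pvDGet countdic i 0 ≥ p.2 then (i, pvDGet countdic i 0) else p) (ck, cv)).1,
           (rest.foldl (fun (p : String × Int) i =>
              if pvDGet countdic i 0 ≥ p.2 then (i, pvDGet countdic i 0) else p) (ck, cv)).2,
           vs + (rest.map (fun i => pvDGet countdic i 0)).sum,
           ri ++ rest.flatMap (fun i => pvDGet samdic i [])) := by
  induction rest with
  | nil => intro ck cv vs ri; simp
  | cons i rest ih =>
    intro ck cv vs ri
    by_cases h : cv > pvDGet countdic i 0
    · have h' : ¬ pvDGet countdic i 0 ≥ cv := by omega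
      simp only [List.foldl_cons, MaxKeysStep, if_pos h, if_neg h', ih, List.map_cons,
        List.sum_cons, List.flatMap_cons, List.append_assoc]
      simp [add_assoc]
    · have h' : pvDGet countdic i 0 ≥ cv := by omega
      simp only [List.foldl_cons, MaxKeysStep, if_neg h, if_pos h', ih, List.map_cons,
        List.sum_cons, List.flatMap_cons, List.append_assoc]
      simp [add_assoc]

-- The forward last-wins argmax fold computes (last key attaining the max, running max):
-- its value is the running max of the counts, and its key is the first key of the
-- REVERSED list whose count equals that max.
theorem argmax_fold_char (countdic : List (String × Int)) (rest : List String) (k0 : String) :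
    (rest.foldl (fun (p : String × Int) i =>
        if pvDGet countdic i 0 ≥ p.2 then (i, pvDGet countdic i 0) else p)
      (k0, pvDGet countdic k0 0)).2
      = (rest.map (fun i => pvDGet countdic i 0)).foldl max (pvDGet countdic k0 0)
    ∧ (k0 :: rest).reverse.find? (fun i =>
        pvDGet countdic i 0 ==
        (rest.foldl (fun (p : String × Int) i =>
            if pvDGet countdic i 0 ≥ p.2 then (i, pvDGet countdic i 0) else p)
          (k0, pvDGet countdic k0 0)).2)
      = some (rest.foldl (fun (p : String × Int) i =>
          if pvDGet countdic i 0 ≥ p.2 then (i, pvDGet countdic i 0) else p)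
        (k0, pvDGet countdic k0 0)).1 := by
  induction rest using List.reverseRecOn with
  | nil => simp
  | append_singleton rest x ih =>
    obtain ⟨ihv, ihk⟩ := ih
    by_cases h : pvDGet countdic x 0 ≥
        (rest.foldl (fun (p : String × Int) i =>
            if pvDGet countdic i 0 ≥ p.2 then (i, pvDGet countdic i 0) else p)
          (k0, pvDGet countdic k0 0)).2
    · constructor
      · simp only [List.foldl_append, List.foldl_cons, List.foldl_nil, if_pos h,
          List.map_append, List.map_cons, List.map_nil]
        omega
      · simp only [List.foldl_append, List.foldl_cons, List.foldl_nil, if_pos h]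
        simp
    · constructor
      · simp only [List.foldl_append, List.foldl_cons, List.foldl_nil, if_neg h,
          List.map_append, List.map_cons, List.map_nil]
        omega
      · have hrev : (k0 :: (rest ++ [x])).reverse = x :: (k0 :: rest).reverse := by simp
        simp only [List.foldl_append, List.foldl_cons, List.foldl_nil, if_neg h, hrev]
        rw [List.find?_cons_of_neg]
        · exact ihk
        · simp only [beq_iff_eq]
          omega

-- ===== VERDICT (by name: the statement is the Claim_ definition above) =====
theorem MaxKeys_spec : Claim_equal_MaxKeys := by
  intro k countdic samdic _ hpre
  unfold Spec_MaxKeys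
  obtain ⟨hne, -⟩ := hpre
  match k with
  | [] => exact absurd rfl hne
  | k0 :: rest =>
    obtain ⟨hv, hk⟩ := argmax_fold_char countdic rest k0
    simp only [MaxKeys, MaxKeys_alt, List.foldl_cons, MaxKeysStep, maxKeys_loop_eq,
      Option.getD_some, List.map_cons, PySem.List.max?_id_cons, ← hv, hk,
      List.sum_cons, List.flatMap_cons]
    simp
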